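-- pv_equiv track=rewrite | github.com/Kyungpyo-Kim/PythonApplication | CodingTest/programers/12_best_set.py | solution
-- ===== SOURCE A (Python) =====
-- def solution(n, s):
--     if n > s:
--         return [-1]
--
--     q = s // n
--     r = s % n
--     answer = []
--     for _ in range(n):
--         answer.append(q + 1 if r else q)
--         if r:
--             r -= 1
--     answer.sort()
--     return answer
-- ===== SOURCE B (Python) =====
-- def solution(n, s):
--     if n > s:
--         return [-1]
--     q, r = divmod(s, n)
--     return [q] * (n - r) + [q + 1] * r
-- ===== Notes on version B (the rewrite author's own statement) =====
-- stated objective: simpler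
-- what changed: Replaces the append loop plus sort with a direct closed-form construction [q]*(n-r)+[q+1]*r, eliminating the loop and the O(n log n) sort.
import Mathlib
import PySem

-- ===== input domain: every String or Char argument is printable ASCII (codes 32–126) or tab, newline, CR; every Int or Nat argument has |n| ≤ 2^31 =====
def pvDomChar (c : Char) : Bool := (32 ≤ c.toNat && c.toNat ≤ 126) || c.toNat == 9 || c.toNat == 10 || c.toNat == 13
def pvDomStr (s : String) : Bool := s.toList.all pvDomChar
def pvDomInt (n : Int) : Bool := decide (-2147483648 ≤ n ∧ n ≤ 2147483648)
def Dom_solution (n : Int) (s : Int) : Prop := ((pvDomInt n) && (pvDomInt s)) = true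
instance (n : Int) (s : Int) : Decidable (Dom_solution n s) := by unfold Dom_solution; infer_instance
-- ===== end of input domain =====

-- B replaces A's append loop and sort with the closed-form list [q]*(n-r)+[q+1]*r (simpler, no sort).

-- ===== PORT A =====
-- loop body of A: append q+1 while r is truthy (then decrement r), else append q
def pvStepA (q : Int) (st : Int × List Int) (_ : Int) : Int × List Int :=
  (if st.1 ≠ 0 then st.1 - 1 else st.1, st.2 ++ [if st.1 ≠ 0 then q + 1 else q])

def solution (n : Int) (s : Int) : List Int :=
  if n > s then [-1]
  else
    let q := PySem.Int.floordiv s n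
    let r := PySem.Int.mod s n
    let st := (PySem.List.pyRange 0 n 1).foldl (pvStepA q) (r, ([] : List Int))
    PySem.List.sorted st.2 (fun x => x) false

-- ===== PORT B =====
def solution_alt (n : Int) (s : Int) : List Int :=
  if n > s then [-1]
  else
    let q := PySem.Int.floordiv s n
    let r := PySem.Int.mod s n
    List.replicate (n - r).toNat q ++ List.replicate r.toNat (q + 1)

-- ===== PRECONDITION & SPEC =====
-- Pre_ excludes exactly the inputs where A raises ZeroDivisionError: n = 0 with 0 ≤ s.
def Pre_solution (n : Int) (s : Int) : Prop := n = 0 → s < 0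
instance (n : Int) (s : Int) : Decidable (Pre_solution n s) := by unfold Pre_solution; infer_instance
def pvWitness_solution : Int × Int := (3, 11)
def Spec_solution (n : Int) (s : Int) (out : List Int) : Prop := out = solution_alt n s
instance (n : Int) (s : Int) (out : List Int) : Decidable (Spec_solution n s out) := by unfold Spec_solution; infer_instance

-- ===== CLAIM (what is proved, stated in full; the proofs are below) =====
def Claim_equal_solution : Prop := ∀ (n : Int) (s : Int), Dom_solution n s → Pre_solution n s → Spec_solution n s (solution n s)

-- ===== LEMMAS AND PROOFS =====

-- the loop of A: after folding over a list of length k with counter r (0 ≤ r ≤ k),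
-- the accumulated answer is acc ++ [q+1]*r ++ [q]*(k-r)
theorem pv_loop_spec (q : Int) : ∀ (l : List Int) (r : Int) (acc : List Int), 0 ≤ r → r ≤ l.length →
    (l.foldl (pvStepA q) (r, acc)).2
    = acc ++ List.replicate r.toNat (q + 1) ++ List.replicate (l.length - r.toNat) q := by
  intro l
  induction l with
  | nil =>
    intro r acc h0 h1
    have : r = 0 := by simpa using le_antisymm h1 h0
    simp [this]
  | cons x t ih =>
    intro r acc h0 h1
    by_cases hr : r = 0
    · subst hr
      rw [List.foldl_cons]
      have hstep : pvStepA q (0, acc) x = (0, acc ++ [q]) := by simp [pvStepA]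
      rw [hstep, ih 0 (acc ++ [q]) le_rfl (by simp)]
      simp [List.replicate_succ]
    · rw [List.foldl_cons]
      have hstep : pvStepA q (r, acc) x = (r - 1, acc ++ [q + 1]) := by simp [pvStepA, hr]
      have hlen : r - 1 ≤ (t.length : Int) := by
        simp only [List.length_cons] at h1; push_cast at h1 ⊢; omega
      rw [hstep, ih (r - 1) (acc ++ [q + 1]) (by omega) hlen]
      have h2 : r.toNat = (r - 1).toNat + 1 := by omega
      rw [h2]
      have h3 : (x :: t).length - ((r - 1).toNat + 1) = t.length - (r - 1).toNat := by simp
      rw [h3, List.replicate_succ]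
      simp

theorem solution_spec : Claim_equal_solution := by
  intro n s _ hpre
  unfold Spec_solution solution solution_alt
  by_cases hgt : n > s
  · simp [hgt]
  · simp only [if_neg hgt]
    have hn0 : n ≠ 0 := fun h => absurd (hpre h) (by omega)
    by_cases hpos : 0 < n
    · -- n > 0 : the loop produces [q+1]*r ++ [q]*(n-r); sort reorders to [q]*(n-r) ++ [q+1]*r
      set q := PySem.Int.floordiv s n with hq
      set r := PySem.Int.mod s n with hr
      have hr0 : 0 ≤ r := PySem.Int.mod_nonneg s hpos
      have hrn : r < n := PySem.Int.mod_lt s hpos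
      have hlen : (PySem.List.pyRange 0 n 1).length = n.toNat := by
        simp [PySem.List.length_pyRange_one]
      have hloop := pv_loop_spec q (PySem.List.pyRange 0 n 1) r [] hr0 (by omega)
      simp only [List.nil_append] at hloop
      simp only [hloop, hlen]
      have hperm : (List.replicate ((n - r).toNat) q ++ List.replicate r.toNat (q + 1)).Perm
          (List.replicate r.toNat (q + 1) ++ List.replicate (n.toNat - r.toNat) q) := by
        have : (n - r).toNat = n.toNat - r.toNat := by omega
        rw [this]
        exact List.perm_append_comm
      have hpw : (List.replicate ((n - r).toNat) q ++ List.replicate r.toNat (q + 1)).Pairwise (· ≤ ·) := by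
        apply List.pairwise_append.mpr
        refine ⟨List.pairwise_replicate.mpr (by simp), List.pairwise_replicate.mpr (by simp), ?_⟩
        intro a ha b hb
        have := List.eq_of_mem_replicate ha
        have := List.eq_of_mem_replicate hb
        omega
      exact PySem.List.sorted_id_eq_of_perm_of_pairwise _ _ hperm hpw
    · -- n < 0 : the loop body runs zero times and both sides are []
      have h0 : (n - 0).toNat = 0 := by omega
      have hrange : PySem.List.pyRange 0 n 1 = [] := by
        rw [PySem.List.pyRange_one, h0]; simp
      have hb := PySem.Int.mod_neg_bounds s (by omega : n < 0)
      have h1 : (n - PySem.Int.mod s n).toNat = 0 := by omega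
      have h2 : (PySem.Int.mod s n).toNat = 0 := by omega
      simp [hrange, h1, h2, PySem.List.sorted]
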